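-- pv_equiv track=rewrite | github.com/al-berger/regd | regd/tok.py | escapedpart
-- ===== SOURCE A (Python) =====
-- def escaped( s, idx, sym='\\' ):
-- 	'''Determines if a character is escaped'''
-- 	# TODO: I couldn't come up with a reliable way to determine whether a character is
-- 	# escaped if it's preceded with a backslash:
-- 	# >>> len('\=')
-- 	# >>> 2
-- 	# >>> len('\\=')
-- 	# >>> 2
-- 	# >>> len('\\a')
-- 	# >>> 2
-- 	# >>> len('\\\a')
-- 	# >>> 2
-- 	# Because of this there is a rule that separators must not be preceded with a backslash.
-- 	# If an item ends with backslash, a whitespace must be inserted between the backslash and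
-- 	# the separator (this whitespace won't be considered a part of the token).
-- 	# The same is true if a token part ends with whitespace: another white space should be
-- 	# inserted between the whitespace and separator. This is for allowing the equivalence of
-- 	# two variants: 'a=b' and 'a = b'.
-- 	if not ( s and idx ):
-- 		return False
--
-- 	return ( s[idx-1] is sym )
--
-- def escapedpart( tok, sep, second=False ):
-- 	'''Partition on non-escaped separators'''
-- 	if not tok:
-- 		return (None, None)
-- 	idx = -1
-- 	start = 0
--
-- 	# Special case: separator as the first character
-- 	if tok[0] == sep:
-- 		tok = tok[1:]
-- 		return ('', tok)
--
-- 	while True: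
-- 		idx = tok.find( sep, start )
-- 		if ( idx == -1 ) or not escaped(tok, idx):
-- 			break
--
-- 		start = idx + 1
--
-- 	if idx == -1:
-- 		tok = tok.replace("\\"+sep, sep)
-- 		return (None, tok) if second else ( tok, None )
--
-- 	l, r = ( tok[0:idx], tok[(idx+1):] )
-- 	l = l.replace("\\"+sep, sep)
-- 	#r = r.replace("\\"+sep, sep)
--
-- 	return (l, r)
-- ===== SOURCE B (Python) =====
-- def escapedpart(tok, sep, second=False):
-- 	'''Partition on non-escaped separators (single left-to-right position scan)'''
-- 	if not tok:
-- 		return (None, None)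
-- 	esc = '\\' + sep
-- 	n = len(tok)
-- 	i = 0
-- 	while i < n:
-- 		if tok.startswith(sep, i) and not (i and tok[i - 1] == '\\'):
-- 			return (tok[:i].replace(esc, sep), tok[i + 1:])
-- 		i += 1
-- 	t = tok.replace(esc, sep)
-- 	return (None, t) if second else (t, None)
-- ===== Notes on version B (the rewrite author's own statement) =====
-- stated objective: simpler
-- what changed: Replaces A's find/skip loop (str.find restarted past each escaped hit, plus a separate special case for a leading separator and a helper 'escaped') by a single left-to-right scan over positions testing 'sep starts here and the previous char is not a backslash', which subsumes the special case.
import Mathlib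
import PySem

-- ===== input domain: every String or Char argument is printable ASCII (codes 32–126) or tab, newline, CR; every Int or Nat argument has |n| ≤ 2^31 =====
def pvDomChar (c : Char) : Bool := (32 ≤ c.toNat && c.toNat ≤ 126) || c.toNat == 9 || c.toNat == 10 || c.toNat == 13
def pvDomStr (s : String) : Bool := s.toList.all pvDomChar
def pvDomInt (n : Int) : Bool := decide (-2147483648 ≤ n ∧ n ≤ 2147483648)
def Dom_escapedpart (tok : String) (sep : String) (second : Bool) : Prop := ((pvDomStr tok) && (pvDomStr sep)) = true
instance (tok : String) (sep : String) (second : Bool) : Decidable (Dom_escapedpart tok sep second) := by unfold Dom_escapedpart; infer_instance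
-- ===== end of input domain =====

-- B replaces A's find/skip loop (str.find restarted after each escaped hit, plus a special
-- case for a leading separator) by one left-to-right scan over positions that tests
-- "separator starts here and the previous char is not a backslash"; same return value, no speed claim.


-- ===== PORT A =====
-- helper 'escaped(s, idx)' of A (sym is always '\\' at the call sites)
def escapedA (s : List Char) (idx : Int) : Bool :=
  if s = [] ∨ idx = 0 then false
  else PySem.List.pyGet? s (idx - 1) == some '\\'

-- A's 'while True' find/skip loop; fuel only makes the loop total (called with
-- tok.length + 2, more than the loop can ever iterate since start strictly grows)
def loopA (tok sep : List Char) (start : Nat) (fuel : Nat) : Int :=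
  match fuel with
  | 0 => -1
  | fuel + 1 =>
    let idx := PySem.Chars.findFrom tok sep (start : Int)
    if idx = -1 ∨ escapedA tok idx = false then idx
    else loopA tok sep (idx.toNat + 1) fuel

def escapedpartCore (tokL sepL : List Char) (second : Bool) :
    Option (List Char) × Option (List Char) :=
  if tokL = [] then (none, none)
  else if [tokL.headI] = sepL then
    (some [], some (PySem.List.slice tokL (some 1) none))
  else
    let idx := loopA tokL sepL 0 (tokL.length + 2)
    if idx = -1 then
      let t := PySem.Chars.replace tokL ('\\' :: sepL) sepL
      if second then (none, some t) else (some t, none)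
    else
      let l := PySem.Chars.replace (PySem.List.slice tokL (some 0) (some idx)) ('\\' :: sepL) sepL
      (some l, some (PySem.List.slice tokL (some (idx + 1)) none))

def escapedpart (tok : String) (sep : String) (second : Bool) : Option String × Option String :=
  match escapedpartCore tok.toList sep.toList second with
  | (l, r) => (l.map String.ofList, r.map String.ofList)

-- ===== PORT B =====
-- B's single scan: first position i where sep starts and tok[i-1] is not a backslash
def scanB (tokL sepL : List Char) (i : Nat) : Option Nat :=
  if i < tokL.length then
    if PySem.Chars.startswith (tokL.drop i) sepL
        && !(decide (i ≠ 0) && (PySem.List.pyGet? tokL ((i : Int) - 1) == some '\\')) then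
      some i
    else scanB tokL sepL (i + 1)
  else none
termination_by tokL.length - i

def escapedpartAltCore (tokL sepL : List Char) (second : Bool) :
    Option (List Char) × Option (List Char) :=
  if tokL = [] then (none, none)
  else
    match scanB tokL sepL 0 with
    | some i =>
      (some (PySem.Chars.replace (tokL.take i) ('\\' :: sepL) sepL), some (tokL.drop (i + 1)))
    | none =>
      let t := PySem.Chars.replace tokL ('\\' :: sepL) sepL
      if second then (none, some t) else (some t, none)

def escapedpart_alt (tok : String) (sep : String) (second : Bool) : Option String × Option String :=
  match escapedpartAltCore tok.toList sep.toList second with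
  | (l, r) => (l.map String.ofList, r.map String.ofList)

-- ===== PRECONDITION & SPEC =====
def Spec_escapedpart (tok : String) (sep : String) (second : Bool) (out : Option String × Option String) : Prop := out = escapedpart_alt tok sep second
instance (tok : String) (sep : String) (second : Bool) (out : Option String × Option String) : Decidable (Spec_escapedpart tok sep second out) := by unfold Spec_escapedpart; infer_instance

-- ===== CLAIM (what is proved, stated in full; the proofs are below) =====
def Claim_equal_escapedpart : Prop := ∀ (tok : String) (sep : String) (second : Bool), Dom_escapedpart tok sep second → Spec_escapedpart tok sep second (escapedpart tok sep second)

-- ===== LEMMAS AND PROOFS =====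

theorem replace_nil (old new : List Char) (h : old ≠ []) :
    PySem.Chars.replace [] old new = [] := by
  cases old with
  | nil => exact absurd rfl h
  | cons c cs => simp [PySem.Chars.replace, PySem.Chars.replace.go]

theorem not_prefix_of_not_infix {sep tok : List Char} {k m : Nat}
    (h : ¬ sep <:+: tok.drop k) (hm : k ≤ m) : ¬ sep <+: tok.drop m := by
  intro hp
  apply h
  rw [← (PySem.Chars.isIn_iff_infix sep (tok.drop k)),
      ← PySem.Chars.exists_prefix_drop_iff_isIn]
  exact ⟨m - k, by rwa [List.drop_drop, Nat.add_sub_cancel' hm]⟩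

theorem startswith_false (tok sep : List Char) (i : Nat) (h : ¬ sep <+: tok.drop i) :
    PySem.Chars.startswith (tok.drop i) sep = false := by
  rw [← Bool.not_eq_true, PySem.Chars.startswith_iff]; exact h

theorem scanB_none_aux (tok sep : List Char) :
    ∀ n i, tok.length - i ≤ n → (∀ m, i ≤ m → ¬ sep <+: tok.drop m) →
    scanB tok sep i = none := by
  intro n
  induction n with
  | zero =>
    intro i hn _
    rw [scanB, if_neg (by omega)]
  | succ n ih =>
    intro i hn h
    by_cases hi : i < tok.length
    · rw [scanB, if_pos hi,
        if_neg (by simp [startswith_false tok sep i (h i le_rfl)])]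
      exact ih (i + 1) (by omega) (fun m hm => h m (by omega))
    · rw [scanB, if_neg hi]

theorem scanB_none (tok sep : List Char) :
    ∀ i, (∀ m, i ≤ m → ¬ sep <+: tok.drop m) → scanB tok sep i = none :=
  fun i => scanB_none_aux tok sep (tok.length - i) i le_rfl

theorem scanB_skip_aux (tok sep : List Char) (j : Nat) :
    ∀ n i, j - i ≤ n → i ≤ j → (∀ m, i ≤ m → m < j → ¬ sep <+: tok.drop m) →
    scanB tok sep i = scanB tok sep j := by
  intro n
  induction n with
  | zero =>
    intro i hn hij _
    have : i = j := by omega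
    rw [this]
  | succ n ih =>
    intro i hn hij h
    rcases Nat.eq_or_lt_of_le hij with heq | hlt
    · rw [heq]
    · by_cases hi : i < tok.length
      · rw [scanB, if_pos hi,
          if_neg (by simp [startswith_false tok sep i (h i le_rfl hlt)])]
        exact ih (i + 1) (by omega) hlt (fun m hm hmj => h m (by omega) hmj)
      · rw [scanB, if_neg hi, scanB, if_neg (by omega)]

theorem scanB_skip (tok sep : List Char) (j i : Nat) (hij : i ≤ j)
    (h : ∀ m, i ≤ m → m < j → ¬ sep <+: tok.drop m) :
    scanB tok sep i = scanB tok sep j :=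
  scanB_skip_aux tok sep j (j - i) i le_rfl hij h

theorem loop_eq (tok sep : List Char) (hsep : sep ≠ []) :
    ∀ fuel start, start ≤ tok.length → tok.length + 2 - start ≤ fuel →
    loopA tok sep start fuel =
      (match scanB tok sep start with | some i => (i : Int) | none => -1) := by
  intro fuel
  induction fuel with
  | zero => intro start hstart hfuel; omega
  | succ fuel ih =>
    intro start hstart hfuel
    by_cases h1 : PySem.Chars.findFrom tok sep (start : Int) = -1
    · have hninf : ¬ sep <:+: tok.drop start :=
        (PySem.Chars.findFrom_natCast_eq_neg_one_iff tok sep start hstart).mp h1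
      rw [scanB_none tok sep start (fun m hm => not_prefix_of_not_infix hninf hm)]
      simp only [loopA]
      simp [h1]
    · obtain ⟨hge, hpre, hmin⟩ :=
        PySem.Chars.findFrom_natCast_spec tok sep start hstart h1
      have hidxnn : (0 : Int) ≤ PySem.Chars.findFrom tok sep (start : Int) :=
        le_trans (by exact_mod_cast Nat.zero_le start) hge
      have hj : PySem.Chars.findFrom tok sep (start : Int) =
          ((PySem.Chars.findFrom tok sep (start : Int)).toNat : Int) :=
        (Int.toNat_of_nonneg hidxnn).symm
      generalize hJ : (PySem.Chars.findFrom tok sep (start : Int)).toNat = j at *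
      have hjlen : j < tok.length := by
        have hl := hpre.length_le
        rw [List.length_drop] at hl
        have hs : 0 < sep.length := List.length_pos_iff.mpr hsep
        omega
      have hstartj : start ≤ j := by
        rw [hj] at hge; exact_mod_cast hge
      have hskip : scanB tok sep start = scanB tok sep j :=
        scanB_skip tok sep j start hstartj (fun m hm hmj => hmin m hm hmj)
      have htokne : tok ≠ [] := by
        intro hnil; rw [hnil] at hjlen; simp at hjlen
      by_cases hesc : escapedA tok (PySem.Chars.findFrom tok sep (start : Int)) = true
      · have hj0 : j ≠ 0 ∧ PySem.List.pyGet? tok ((j : Int) - 1) = some '\\' := by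
          unfold escapedA at hesc
          rw [hj] at hesc
          split_ifs at hesc with hc
          exact ⟨fun h0 => hc (Or.inr (by simp [h0])), by simpa using hesc⟩
        simp only [loopA]
        rw [if_neg (by simp [h1, hesc]), hJ]
        rw [hskip, scanB, if_pos hjlen,
          if_neg (by simp [hj0.1, hj0.2])]
        exact ih (j + 1) (by omega) (by omega)
      · have hcond : (PySem.Chars.startswith (tok.drop j) sep
            && !(decide (j ≠ 0)
                 && (PySem.List.pyGet? tok ((j : Int) - 1) == some '\\'))) = true := by
          have h1' : PySem.Chars.startswith (tok.drop j) sep = true :=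
            (PySem.Chars.startswith_iff _ _).mpr hpre
          unfold escapedA at hesc
          rw [hj] at hesc
          split_ifs at hesc with hc
          · rcases hc with hnil | h0
            · exact absurd hnil htokne
            · have hj0 : j = 0 := by exact_mod_cast h0
              rw [hj0] at h1'
              simp only [List.drop_zero] at h1'
              simp [h1', hj0]
          · simp only [Bool.not_eq_true] at hesc
            simp [h1', hesc]
        simp only [loopA]
        rw [if_pos (Or.inr (by simpa using hesc))]
        rw [hskip, scanB, if_pos hjlen, if_pos hcond]
        exact hj

theorem slice_zero_nat {α : Type} (xs : List α) (i : Nat) :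
    PySem.List.slice xs (some 0) (some (i : Int)) = xs.take i := by
  simp

theorem core_eq (tokL sepL : List Char) (second : Bool) :
    escapedpartCore tokL sepL second = escapedpartAltCore tokL sepL second := by
  by_cases ht : tokL = []
  · simp [escapedpartCore, escapedpartAltCore, ht]
  · have hlen : 0 < tokL.length := List.length_pos_iff.mpr ht
    have hesc_ne : ('\\' :: sepL) ≠ [] := by simp
    by_cases hhead : [tokL.headI] = sepL
    · have hpre0 : sepL <+: tokL := by
        rw [← hhead]
        cases tokL with
        | nil => exact absurd rfl ht
        | cons c rest => exact ⟨rest, rfl⟩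
      have h0 : scanB tokL sepL 0 = some 0 := by
        rw [scanB, if_pos hlen,
          if_pos (by simp [(PySem.Chars.startswith_iff _ _).mpr hpre0])]
      rw [escapedpartCore, escapedpartAltCore]
      rw [if_neg ht, if_pos hhead, if_neg ht, h0]
      rw [PySem.List.slice_from tokL (by norm_num : (0:Int) ≤ 1)]
      simp [replace_nil _ _ hesc_ne]
    · by_cases hsep : sepL = []
      · have hloop : loopA tokL sepL 0 (tokL.length + 2) = 0 := by
          rw [loopA]
          simp only [Nat.cast_zero, PySem.Chars.findFrom_zero, hsep,
            PySem.Chars.find_nil]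
          rw [if_pos (Or.inr (by simp [escapedA]))]
        have h0 : scanB tokL sepL 0 = some 0 := by
          rw [scanB, if_pos hlen,
            if_pos (by simp [hsep, (PySem.Chars.startswith_iff _ _).mpr List.nil_prefix])]
        rw [escapedpartCore, escapedpartAltCore]
        rw [if_neg ht, if_neg hhead, if_neg ht, h0]
        simp only [hloop]
        rw [if_neg (by norm_num)]
        rw [PySem.List.slice_from tokL (by norm_num : (0:Int) ≤ 0 + 1)]
        have : PySem.List.slice tokL (some 0) (some (0 : Int)) = tokL.take 0 :=
          slice_zero_nat tokL 0
        simp only [this]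
        norm_num
      · have hmain := loop_eq tokL sepL hsep (tokL.length + 2) 0 (by omega) (by omega)
        rw [escapedpartCore, escapedpartAltCore]
        rw [if_neg ht, if_neg hhead, if_neg ht]
        cases hscan : scanB tokL sepL 0 with
        | none =>
          rw [hscan] at hmain
          have hmain' : loopA tokL sepL 0 (tokL.length + 2) = -1 := hmain
          rw [hmain']
          simp
        | some i =>
          rw [hscan] at hmain
          have hmain' : loopA tokL sepL 0 (tokL.length + 2) = (i : Int) := hmain
          rw [hmain']
          rw [if_neg (by omega : ¬ (i : Int) = -1)]
          rw [slice_zero_nat tokL i,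
            PySem.List.slice_from tokL (by omega : (0:Int) ≤ (i : Int) + 1)]
          have : ((i : Int) + 1).toNat = i + 1 := by omega
          rw [this]

-- ===== VERDICT (by name: the statement is the Claim_ definition above) =====
theorem escapedpart_spec : Claim_equal_escapedpart := by
  intro tok sep second _
  unfold Spec_escapedpart escapedpart escapedpart_alt
  rw [core_eq]
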